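-- pv_equiv track=rewrite | github.com/Kasho323/codebase-explainer-agent | src/codebase_explainer/resolver.py | _enclosing_class
-- ===== SOURCE A (Python) =====
-- def _enclosing_class(
--     caller_qn: str | None, qn_to_kind: dict[str, str]
-- ) -> str | None:
--     """Walk up ``caller_qn`` and return the longest prefix that's a class.
--
--     For ``caller_qn="myapp.models.User.save"`` this returns
--     ``"myapp.models.User"``. For top-level functions it returns None.
--     """
--     if not caller_qn:
--         return None
--     parts = caller_qn.split(".")
--     parts.pop()  # strip the leaf (the caller itself)
--     while parts:
--         candidate = ".".join(parts)
--         if qn_to_kind.get(candidate) == "class":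
--             return candidate
--         parts.pop()
--     return None
-- ===== SOURCE B (Python) =====
-- def _enclosing_class(caller_qn, qn_to_kind):
--     if not caller_qn:
--         return None
--     segs = caller_qn.split(".")
--     best = None
--     prefix = ""
--     for i, seg in enumerate(segs[:-1]):
--         prefix = seg if i == 0 else prefix + "." + seg
--         if qn_to_kind.get(prefix) == "class":
--             best = prefix
--     return best
-- ===== Notes on version B (the rewrite author's own statement) =====
-- stated objective: alternative
-- what changed: B scans the proper prefixes in the opposite direction (shortest to longest), building each dotted prefix incrementally by appending one segment at a time and keeping the last matching prefix as a running best, instead of A's backward loop that re-joins the remaining segments and early-returns on the first (longest) hit.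
import Mathlib
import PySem

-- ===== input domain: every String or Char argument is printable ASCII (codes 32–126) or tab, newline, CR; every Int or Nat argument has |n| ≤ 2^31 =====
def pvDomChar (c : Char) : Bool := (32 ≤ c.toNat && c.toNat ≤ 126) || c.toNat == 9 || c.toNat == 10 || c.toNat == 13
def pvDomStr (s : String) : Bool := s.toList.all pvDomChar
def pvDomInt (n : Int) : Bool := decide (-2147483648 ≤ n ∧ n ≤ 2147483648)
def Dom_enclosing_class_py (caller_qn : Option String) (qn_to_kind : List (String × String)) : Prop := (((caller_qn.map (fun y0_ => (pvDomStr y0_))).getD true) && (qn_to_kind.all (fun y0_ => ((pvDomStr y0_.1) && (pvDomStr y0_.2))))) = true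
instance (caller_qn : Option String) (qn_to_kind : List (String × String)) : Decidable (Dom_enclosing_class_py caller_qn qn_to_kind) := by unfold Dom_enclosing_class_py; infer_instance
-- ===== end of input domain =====

-- B scans prefixes shortest→longest with an incremental accumulator instead of A's
-- backward strip-and-rejoin loop; same results, same cost (objective: alternative).

-- dict.get on the association list (first match — the dict convention of the task)
def pyDictGet (m : List (String × String)) (k : String) : Option String :=
  (m.find? (fun p => p.1 == k)).map (·.2)

-- ===== PORT A =====
-- the 'while parts:' loop of A: join the remaining segments, return on a hit, else pop the last
def enclosingLoopA (m : List (String × String)) : List String → Option String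
  | [] => none
  | p :: ps =>
      let candidate := PySem.Str.join "." (p :: ps)
      if pyDictGet m candidate = some "class" then some candidate
      else enclosingLoopA m (p :: ps).dropLast
  termination_by l => l.length
  decreasing_by simp [List.length_dropLast]

def enclosing_class_py (caller_qn : Option String) (qn_to_kind : List (String × String)) : Option String :=
  match caller_qn with
  | none => none
  | some s =>
    if s = "" then none
    else
      -- s.split("."): sep is the non-empty literal ".", so split? never returns none
      let parts := (PySem.Str.split? s ".").getD []
      enclosingLoopA qn_to_kind parts.dropLast

-- ===== PORT B =====
-- one step of B's forward loop: state = (best so far, prefix built so far, index)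
def encStepB (m : List (String × String)) (acc : Option String × String × Nat) (seg : String) : Option String × String × Nat :=
  let pre := if acc.2.2 = 0 then seg else acc.2.1 ++ "." ++ seg
  (if pyDictGet m pre = some "class" then some pre else acc.1, pre, acc.2.2 + 1)

def enclosing_class_py_alt (caller_qn : Option String) (qn_to_kind : List (String × String)) : Option String :=
  match caller_qn with
  | none => none
  | some s =>
    if s = "" then none
    else
      let segs := (PySem.Str.split? s ".").getD []
      (segs.dropLast.foldl (encStepB qn_to_kind) (none, "", 0)).1

-- ===== PRECONDITION & SPEC =====
def Spec_enclosing_class_py (caller_qn : Option String) (qn_to_kind : List (String × String)) (out : Option String) : Prop := out = enclosing_class_py_alt caller_qn qn_to_kind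
instance (caller_qn : Option String) (qn_to_kind : List (String × String)) (out : Option String) : Decidable (Spec_enclosing_class_py caller_qn qn_to_kind out) := by unfold Spec_enclosing_class_py; infer_instance

-- ===== CLAIM (what is proved, stated in full; the proofs are below) =====
def Claim_equal_enclosing_class_py : Prop := ∀ (caller_qn : Option String) (qn_to_kind : List (String × String)), Dom_enclosing_class_py caller_qn qn_to_kind → Spec_enclosing_class_py caller_qn qn_to_kind (enclosing_class_py caller_qn qn_to_kind)

-- ===== LEMMAS AND PROOFS =====

theorem chars_join_concat (sep : List Char) (l : List (List Char)) (c : List Char) (h : l ≠ []) :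
    PySem.Chars.join sep (l ++ [c]) = PySem.Chars.join sep l ++ sep ++ c := by
  induction l with
  | nil => exact absurd rfl h
  | cons a t ih =>
    cases t with
    | nil => simp [PySem.Chars.join_cons_cons, PySem.Chars.join_singleton]
    | cons b r =>
      have h2 := ih (by simp)
      simp only [List.cons_append, PySem.Chars.join_cons_cons]
      rw [show b :: (r ++ [c]) = (b :: r) ++ [c] from rfl, h2]
      simp [List.append_assoc]

theorem str_join_singleton (x : String) : PySem.Str.join "." [x] = x :=
  String.toList_inj.mp (by simp [PySem.Str.toList_join, PySem.Chars.join_singleton])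

theorem str_join_concat (xs : List String) (x : String) (h : xs ≠ []) :
    PySem.Str.join "." (xs ++ [x]) = PySem.Str.join "." xs ++ "." ++ x := by
  apply String.toList_inj.mp
  simp only [PySem.Str.toList_join, String.toList_append, List.map_append, List.map_cons,
    List.map_nil]
  exact chars_join_concat _ _ _ (by simpa using h)

theorem loopA_cons_eq (m : List (String × String)) (l : List String) (h : l ≠ []) :
    enclosingLoopA m l =
      (if pyDictGet m (PySem.Str.join "." l) = some "class" then some (PySem.Str.join "." l)
       else enclosingLoopA m l.dropLast) := by
  cases l with
  | nil => exact absurd rfl h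
  | cons p ps => rw [enclosingLoopA]

theorem foldB_eq (m : List (String × String)) (parts : List String) :
    parts.foldl (encStepB m) (none, "", 0) =
      (enclosingLoopA m parts, PySem.Str.join "." parts, parts.length) := by
  induction parts using List.reverseRecOn with
  | nil =>
    have hj : PySem.Str.join "." ([] : List String) = "" := by decide
    simp [enclosingLoopA, hj]
  | append_singleton xs x ih =>
    rw [List.foldl_append, ih]
    rcases eq_or_ne xs ([] : List String) with hxs | hxs
    · subst hxs
      simp only [List.nil_append]
      rw [loopA_cons_eq m [x] (by simp)]
      simp [encStepB, str_join_singleton, enclosingLoopA]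
    · have hpre : PySem.Str.join "." (xs ++ [x]) = PySem.Str.join "." xs ++ "." ++ x :=
        str_join_concat xs x hxs
      have hlen : xs.length ≠ 0 := by simpa [List.length_eq_zero_iff] using hxs
      rw [loopA_cons_eq m (xs ++ [x]) (by simp), List.dropLast_concat, hpre]
      simp [encStepB, hlen]

-- ===== VERDICT (by name: the statement is the Claim_ definition above) =====
theorem enclosing_class_py_spec : Claim_equal_enclosing_class_py := by
  intro caller_qn qn_to_kind _
  unfold Spec_enclosing_class_py enclosing_class_py enclosing_class_py_alt
  cases caller_qn with
  | none => rfl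
  | some s =>
    by_cases hs : s = ""
    · simp [hs]
    · simp only [if_neg hs]
      rw [foldB_eq]
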